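-- pv_equiv track=rewrite | github.com/liangtaohy/LotusSpider | captcha/image_tools.py | bin_table
-- ===== SOURCE A (Python) =====
-- def bin_table(threshold=250):
--     table = []
--     for i in range(256):
--         if i <= threshold:
--             table.append(0)
--         else:
--             table.append(1)
--     return table
-- ===== SOURCE B (Python) =====
-- def bin_table(threshold=250):
--     n = min(256, max(0, threshold + 1))
--     return [0] * n + [1] * (256 - n)
-- ===== Notes on version B (the rewrite author's own statement) =====
-- stated objective: simpler
-- what changed: Replaces the 256-iteration scan-and-branch loop with a closed-form split point n = clamp(threshold+1, 0, 256) and builds the table as two replicated runs [0]*n + [1]*(256-n).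
import Mathlib
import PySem

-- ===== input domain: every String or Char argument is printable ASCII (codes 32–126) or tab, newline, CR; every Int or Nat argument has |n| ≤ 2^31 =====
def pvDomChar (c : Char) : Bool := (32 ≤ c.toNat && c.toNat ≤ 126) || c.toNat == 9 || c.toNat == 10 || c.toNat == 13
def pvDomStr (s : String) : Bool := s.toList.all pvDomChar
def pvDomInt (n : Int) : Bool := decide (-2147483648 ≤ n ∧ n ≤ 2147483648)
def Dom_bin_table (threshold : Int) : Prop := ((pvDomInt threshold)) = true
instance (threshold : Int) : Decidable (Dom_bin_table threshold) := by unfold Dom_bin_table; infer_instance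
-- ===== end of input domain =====

-- B replaces A's 256-iteration scan-and-branch with a closed-form split point and two replicated runs (objective: simpler).

-- ===== PORT A =====
def bin_table (threshold : Int) : List Int :=
  (PySem.List.pyRange 0 256 1).foldl
    (fun table i => if i ≤ threshold then table ++ [0] else table ++ [1]) []

-- ===== PORT B =====
def bin_table_alt (threshold : Int) : List Int :=
  let n : Nat := min 256 (max 0 (threshold + 1)).toNat
  List.replicate n 0 ++ List.replicate (256 - n) 1

-- ===== PRECONDITION & SPEC =====
def Spec_bin_table (threshold : Int) (out : List Int) : Prop := out = bin_table_alt threshold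
instance (threshold : Int) (out : List Int) : Decidable (Spec_bin_table threshold out) := by unfold Spec_bin_table; infer_instance

-- ===== CLAIM (what is proved, stated in full; the proofs are below) =====
def Claim_equal_bin_table : Prop := ∀ (threshold : Int), Dom_bin_table threshold → Spec_bin_table threshold (bin_table threshold)

-- ===== LEMMAS AND PROOFS =====

set_option maxRecDepth 4000 in
theorem pyRange_eq_range_map :
    PySem.List.pyRange 0 256 1 = (List.range 256).map Int.ofNat := by
  decide

theorem foldl_range_replicate (th : Int) (n : Nat) :
    ((List.range n).map Int.ofNat).foldl
      (fun table i => if i ≤ th then table ++ [0] else table ++ [1]) []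
    = List.replicate (min n (max 0 (th + 1)).toNat) (0 : Int)
        ++ List.replicate (n - (max 0 (th + 1)).toNat) 1 := by
  induction n with
  | zero => simp
  | succ n ih =>
    rw [List.range_succ, List.map_append, List.foldl_append, ih]
    set m := (max 0 (th + 1)).toNat with hm
    simp only [List.map_cons, List.map_nil, List.foldl_cons, List.foldl_nil, Int.ofNat_eq_natCast]
    by_cases h : (n : Int) ≤ th
    · have hnm : n < m := by
        have : (0 : Int) ≤ n := Int.natCast_nonneg n
        omega
      rw [if_pos h]
      have h1 : min (n + 1) m = min n m + 1 := by omega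
      have h2 : n - m = 0 := by omega
      have h3 : n + 1 - m = 0 := by omega
      rw [h1, h2, h3]
      rw [List.replicate_succ']; simp
    · have hnm : m ≤ n := by
        have : (0 : Int) ≤ n := Int.natCast_nonneg n
        omega
      rw [if_neg h]
      have h1 : min (n + 1) m = min n m := by omega
      have h2 : n + 1 - m = (n - m) + 1 := by omega
      rw [h1, h2]
      rw [List.replicate_succ']; simp

-- ===== VERDICT (by name: the statement is the Claim_ definition above) =====
theorem bin_table_spec : Claim_equal_bin_table := by
  intro th _
  unfold Spec_bin_table bin_table bin_table_alt
  rw [pyRange_eq_range_map, foldl_range_replicate]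
  have h1 : min 256 (max 0 (th + 1)).toNat = min (256 : Nat) (max 0 (th + 1)).toNat := by omega
  have h2 : 256 - (max 0 (th + 1)).toNat = 256 - min (256 : Nat) (max 0 (th + 1)).toNat := by omega
  rw [h1, h2]
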